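-- pv_equiv track=rewrite | github.com/JaehyunKim94/Algorithm_Problem | BOJ_solve/14226_이모티콘/b_14226.py | BFS
-- ===== SOURCE A (Python) =====
-- def BFS(obj):
--     que_set = set()
--     que_set.add((1, 0))
--     cnt = 0
--     while que_set:
--         tmp_que = set()
--         for num, clip in que_set:
--             if num == obj:
--                 return cnt
--             if clip > 0:
--                 tmp_que.add((num+clip, clip))
--             if num > 2:
--                 tmp_que.add((num-1, clip))
--             if clip != num:
--                 tmp_que.add((num, num))
--         que_set = tmp_que
--         cnt += 1
-- ===== SOURCE B (Python) =====
-- def _succ(num, clip):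
--     out = []
--     if clip > 0:
--         out.append((num + clip, clip))
--     if num > 2:
--         out.append((num - 1, clip))
--     if clip != num:
--         out.append((num, num))
--     return out
--
--
-- def BFS(obj):
--     # Level-synchronous BFS with a global visited set: each (num, clip)
--     # state is expanded at most once, instead of being re-expanded at
--     # every later level as in the original.
--     frontier = {(1, 0)}
--     visited = {(1, 0)}
--     steps = 0
--     while frontier:
--         if any(num == obj for num, _ in frontier):
--             return steps
--         nxt = {s for st in frontier for s in _succ(*st) if s not in visited}
--         visited |= nxt
--         frontier = nxt
--         steps += 1
-- ===== Notes on version B (the rewrite author's own statement) =====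
-- stated objective: faster
-- what changed: Replaces A's visited-less level expansion (each (num,clip) state re-expanded at every later level it reappears in) with a level BFS over a global visited set, so each state is generated and expanded at most once.
import Mathlib
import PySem

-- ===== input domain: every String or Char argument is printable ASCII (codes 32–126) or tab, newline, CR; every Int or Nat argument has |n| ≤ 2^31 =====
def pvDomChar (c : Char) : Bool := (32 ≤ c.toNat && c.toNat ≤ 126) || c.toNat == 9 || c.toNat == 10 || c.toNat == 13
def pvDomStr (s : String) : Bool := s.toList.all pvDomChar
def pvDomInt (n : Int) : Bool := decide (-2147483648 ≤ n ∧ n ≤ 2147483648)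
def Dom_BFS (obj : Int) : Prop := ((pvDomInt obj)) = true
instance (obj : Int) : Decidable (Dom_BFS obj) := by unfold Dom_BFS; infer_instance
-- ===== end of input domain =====

-- B replaces A's visited-less level expansion (states re-expanded at every later level)
-- by a level BFS with a global visited set, expanding each (num, clip) state at most once.
-- Both loops are `while True` searches; the ports realise them with the same fuel
-- (obj.toNat + 1), which is sufficient for every obj ≥ 1 since the copy-then-paste
-- path reaches obj at level ≤ obj; for obj ≤ 0 both Pythons loop forever and both
-- ports exhaust their fuel and return 0.
-- Python `set`s are modelled by Std.HashSet (so the ports are evaluable on the sampled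
-- inputs); every use is order-independent (membership, emptiness, any-hit, building the
-- next set), exactly the uses for which a Python set's iteration order cannot matter.

-- ===== PORT A =====
-- the `for num, clip in que_set` body: early `return cnt` as .error, otherwise the
-- three conditional set-adds building tmp_que (iteration order of the Python set is
-- immaterial: the returned cnt is order-independent and tmp_que is a set)
def aScan (obj cnt : Int) :
    List (Int × Int) → Std.HashSet (Int × Int) → Except Int (Std.HashSet (Int × Int))
  | [], tmp => .ok tmp
  | (num, clip) :: rest, tmp =>
      if num = obj then .error cnt
      else
        let tmp1 := if 0 < clip then tmp.insert (num + clip, clip) else tmp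
        let tmp2 := if 2 < num then tmp1.insert (num - 1, clip) else tmp1
        let tmp3 := if clip ≠ num then tmp2.insert (num, num) else tmp2
        aScan obj cnt rest tmp3

-- the `while que_set:` loop (fuel for totality; Python returns None if the set
-- empties — unreachable, every state has a successor — ported as 0)
def aLoop (obj : Int) : Nat → Std.HashSet (Int × Int) → Int → Int
  | 0, _, _ => 0
  | fuel + 1, que, cnt =>
      if que.isEmpty then 0
      else
        match aScan obj cnt que.toList ∅ with
        | .error r => r
        | .ok tmp => aLoop obj fuel tmp (cnt + 1)

def BFS (obj : Int) : Int :=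
  aLoop obj (obj.toNat + 1) ((∅ : Std.HashSet (Int × Int)).insert (1, 0)) 0

-- ===== PORT B =====
-- _succ(num, clip) of Source B
def succList (num clip : Int) : List (Int × Int) :=
  (if 0 < clip then [(num + clip, clip)] else []) ++
  (if 2 < num then [(num - 1, clip)] else []) ++
  (if clip ≠ num then [(num, num)] else [])

-- the set comprehension of Source B: successors of the frontier not already visited
def bCollect (visited : Std.HashSet (Int × Int)) :
    List (Int × Int) → Std.HashSet (Int × Int) → Std.HashSet (Int × Int)
  | [], nxt => nxt
  | st :: rest, nxt =>
      bCollect visited rest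
        ((succList st.1 st.2).foldl
          (fun acc s => if visited.contains s then acc else acc.insert s) nxt)

-- the `while frontier:` loop of Source B (same fuel device as A's port);
-- `visited |= nxt` is the foldl-insert of nxt's elements
def bLoop (obj : Int) :
    Nat → Std.HashSet (Int × Int) → Std.HashSet (Int × Int) → Int → Int
  | 0, _, _, _ => 0
  | fuel + 1, frontier, visited, steps =>
      if frontier.isEmpty then 0
      else if frontier.toList.any (fun s => s.1 == obj) then steps
      else
        let nxt := bCollect visited frontier.toList ∅
        bLoop obj fuel nxt (nxt.toList.foldl (fun v s => v.insert s) visited) (steps + 1)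

def BFS_alt (obj : Int) : Int :=
  bLoop obj (obj.toNat + 1) ((∅ : Std.HashSet (Int × Int)).insert (1, 0))
    ((∅ : Std.HashSet (Int × Int)).insert (1, 0)) 0

-- ===== PRECONDITION & SPEC =====
def Spec_BFS (obj : Int) (out : Int) : Prop := out = BFS_alt obj
instance (obj : Int) (out : Int) : Decidable (Spec_BFS obj out) := by unfold Spec_BFS; infer_instance

-- ===== CLAIM (what is proved, stated in full; the proofs are below) =====
def Claim_equal_BFS : Prop := ∀ (obj : Int), Dom_BFS obj → Spec_BFS obj (BFS obj)

-- ===== LEMMAS AND PROOFS =====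

-- simulation invariant between A's frontier qA and B's (frontier qB, visited vis):
-- qB ⊆ qA ⊆ vis, and every already-visited state outside B's current frontier
-- is not a hit and has all its successors visited.
def SimInv (obj : Int) (qA qB vis : Std.HashSet (Int × Int)) : Prop :=
  (∀ s, s ∈ qB → s ∈ vis) ∧
  (∀ s, s ∈ qB → s ∈ qA) ∧
  (∀ s, s ∈ qA → s ∈ vis) ∧
  (∀ s, s ∈ vis → s ∉ qB → s.1 ≠ obj) ∧
  (∀ s, s ∈ vis → s ∉ qB → ∀ t, t ∈ succList s.1 s.2 → t ∈ vis)

theorem mem_three_adds (num clip : Int) (tmp : Std.HashSet (Int × Int)) (x : Int × Int) :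
    x ∈ (let tmp1 := if 0 < clip then tmp.insert (num + clip, clip) else tmp
         let tmp2 := if 2 < num then tmp1.insert (num - 1, clip) else tmp1
         if clip ≠ num then tmp2.insert (num, num) else tmp2) ↔
      x ∈ tmp ∨ x ∈ succList num clip := by
  simp only [succList, List.mem_append]
  by_cases h1 : 0 < clip <;> by_cases h2 : 2 < num <;> by_cases h3 : clip ≠ num <;>
    simp [h1, h2, h3, Std.HashSet.mem_insert] <;> tauto

theorem mem_aScan_ok {obj cnt : Int} {l : List (Int × Int)} {tmp T : Std.HashSet (Int × Int)}
    (h : aScan obj cnt l tmp = .ok T) :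
    ∀ x, x ∈ T ↔ x ∈ tmp ∨ ∃ s ∈ l, x ∈ succList s.1 s.2 := by
  induction l generalizing tmp with
  | nil =>
      simp [aScan] at h
      subst h; simp
  | cons hd tl ih =>
      obtain ⟨num, clip⟩ := hd
      rw [aScan] at h
      split at h
      · exact absurd h (by simp)
      · intro x
        rw [ih h x]
        have hm := mem_three_adds num clip tmp x
        simp only at hm
        rw [hm]
        simp only [List.mem_cons]
        constructor
        · rintro ((hx | hx) | ⟨s, hs, hx⟩)
          · exact Or.inl hx
          · exact Or.inr ⟨(num, clip), Or.inl rfl, hx⟩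
          · exact Or.inr ⟨s, Or.inr hs, hx⟩
        · rintro (hx | ⟨s, hs | hs, hx⟩)
          · exact Or.inl (Or.inl hx)
          · subst hs; exact Or.inl (Or.inr hx)
          · exact Or.inr ⟨s, hs, hx⟩

theorem aScan_error {obj cnt : Int} {l : List (Int × Int)} {tmp : Std.HashSet (Int × Int)}
    (h : ∃ s ∈ l, s.1 = obj) : aScan obj cnt l tmp = .error cnt := by
  induction l generalizing tmp with
  | nil => simp at h
  | cons hd tl ih =>
      obtain ⟨num, clip⟩ := hd
      rw [aScan]
      split
      · rfl
      · rename_i hne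
        apply ih
        obtain ⟨s, hs, hobj⟩ := h
        rcases List.mem_cons.mp hs with hs' | hs'
        · subst hs'; exact absurd hobj hne
        · exact ⟨s, hs', hobj⟩

theorem aScan_no_hit {obj cnt : Int} {l : List (Int × Int)} {tmp : Std.HashSet (Int × Int)}
    (h : ∀ s ∈ l, s.1 ≠ obj) : ∃ T, aScan obj cnt l tmp = .ok T := by
  induction l generalizing tmp with
  | nil => exact ⟨tmp, rfl⟩
  | cons hd tl ih =>
      obtain ⟨num, clip⟩ := hd
      rw [aScan]
      split
      · exact absurd (by assumption) (h (num, clip) (List.mem_cons_self ..))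
      · exact ih (fun s hs => h s (List.mem_cons_of_mem _ hs))

theorem mem_foldl_filter_add {visited : Std.HashSet (Int × Int)} (l : List (Int × Int))
    (nxt : Std.HashSet (Int × Int)) (x : Int × Int) :
    x ∈ l.foldl (fun acc s => if visited.contains s then acc else acc.insert s) nxt ↔
      x ∈ nxt ∨ (x ∈ l ∧ x ∉ visited) := by
  induction l generalizing nxt with
  | nil => simp
  | cons hd tl ih =>
      rw [List.foldl_cons]
      by_cases hm : hd ∈ visited
      · rw [if_pos (Std.HashSet.mem_iff_contains.mp hm), ih]
        simp only [List.mem_cons]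
        constructor
        · rintro (h | h)
          · exact Or.inl h
          · exact Or.inr ⟨Or.inr h.1, h.2⟩
        · rintro (h | ⟨h1 | h1, h2⟩)
          · exact Or.inl h
          · subst h1; exact absurd hm h2
          · exact Or.inr ⟨h1, h2⟩
      · rw [if_neg (fun h => hm (Std.HashSet.mem_iff_contains.mpr h)), ih]
        simp only [Std.HashSet.mem_insert, beq_iff_eq, List.mem_cons]
        constructor
        · rintro ((h | h) | h)
          · subst h; exact Or.inr ⟨Or.inl rfl, hm⟩
          · exact Or.inl h
          · exact Or.inr ⟨Or.inr h.1, h.2⟩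
        · rintro (h | ⟨h1 | h1, h2⟩)
          · exact Or.inl (Or.inr h)
          · subst h1; exact Or.inl (Or.inl rfl)
          · exact Or.inr ⟨h1, h2⟩

theorem mem_bCollect {visited : Std.HashSet (Int × Int)} (l : List (Int × Int))
    (nxt : Std.HashSet (Int × Int)) (x : Int × Int) :
    x ∈ bCollect visited l nxt ↔
      x ∈ nxt ∨ ∃ s ∈ l, x ∈ succList s.1 s.2 ∧ x ∉ visited := by
  induction l generalizing nxt with
  | nil => simp [bCollect]
  | cons hd tl ih =>
      rw [bCollect, ih, mem_foldl_filter_add]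
      simp only [List.mem_cons]
      constructor
      · rintro ((h | h) | ⟨s, hs, h1, h2⟩)
        · exact Or.inl h
        · exact Or.inr ⟨hd, Or.inl rfl, h.1, h.2⟩
        · exact Or.inr ⟨s, Or.inr hs, h1, h2⟩
      · rintro (h | ⟨s, hs | hs, h1, h2⟩)
        · exact Or.inl (Or.inl h)
        · subst hs; exact Or.inl (Or.inr ⟨h1, h2⟩)
        · exact Or.inr ⟨s, hs, h1, h2⟩

theorem mem_foldl_insert (l : List (Int × Int)) (v : Std.HashSet (Int × Int)) (x : Int × Int) :
    x ∈ l.foldl (fun v s => v.insert s) v ↔ x ∈ v ∨ x ∈ l := by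
  induction l generalizing v with
  | nil => simp
  | cons hd tl ih =>
      rw [List.foldl_cons, ih]
      simp only [Std.HashSet.mem_insert, beq_iff_eq, List.mem_cons]
      tauto

-- if B's frontier has emptied, A can never hit: its frontier stays inside the
-- closed, hit-free visited set, so A runs out of fuel and returns 0 too
theorem aLoop_zero (obj : Int) (fuel : Nat) :
    ∀ (qA vis : Std.HashSet (Int × Int)) (cnt : Int),
      (∀ s, s ∈ qA → s ∈ vis) →
      (∀ s, s ∈ vis → s.1 ≠ obj) →
      (∀ s, s ∈ vis → ∀ t, t ∈ succList s.1 s.2 → t ∈ vis) →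
      aLoop obj fuel qA cnt = 0 := by
  induction fuel with
  | zero => intros; rfl
  | succ fuel ih =>
      intro qA vis cnt hsub hhit hcl
      rw [aLoop]
      split
      · rfl
      · obtain ⟨T, hT⟩ := aScan_no_hit (obj := obj) (cnt := cnt) (tmp := ∅)
          (fun s hs => hhit s (hsub s (Std.HashSet.mem_toList.mp hs)))
        rw [hT]
        apply ih T vis (cnt + 1) _ hhit hcl
        intro s hsT
        rcases (mem_aScan_ok hT s).mp hsT with h | ⟨u, hu, hsucc⟩
        · exact absurd h (Std.HashSet.not_mem_empty)
        · exact hcl u (hsub u (Std.HashSet.mem_toList.mp hu)) s hsucc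

theorem loop_eq (obj : Int) (fuel : Nat) :
    ∀ (qA qB vis : Std.HashSet (Int × Int)) (cnt : Int),
      SimInv obj qA qB vis →
      aLoop obj fuel qA cnt = bLoop obj fuel qB vis cnt := by
  induction fuel with
  | zero => intros; rfl
  | succ fuel ih =>
      intro qA qB vis cnt hinv
      obtain ⟨h1, h2, h3, h4, h5⟩ := hinv
      rw [aLoop, bLoop]
      by_cases hAe : qA.isEmpty
      · have hBe : qB.isEmpty := by
          rw [Std.HashSet.isEmpty_iff_forall_not_mem] at hAe ⊢
          exact fun s hs => hAe s (h2 s hs)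
        simp [hAe, hBe]
      · simp only [hAe, if_neg, Bool.false_eq_true, not_false_iff]
        by_cases hhit : ∃ s ∈ qA, s.1 = obj
        · -- both return the current count
          have hhit' : ∃ s ∈ qA.toList, s.1 = obj := by
            obtain ⟨s, hs, h⟩ := hhit
            exact ⟨s, Std.HashSet.mem_toList.mpr hs, h⟩
          rw [aScan_error hhit']
          obtain ⟨s, hs, hso⟩ := hhit
          have hsB : s ∈ qB := by
            by_contra hnb
            exact h4 s (h3 s hs) hnb hso
          have hBe : ¬ qB.isEmpty := by
            rw [Std.HashSet.isEmpty_iff_forall_not_mem]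
            exact fun h => h s hsB
          have hany : qB.toList.any (fun t => t.1 == obj) = true := by
            simp only [List.any_eq_true]
            exact ⟨s, Std.HashSet.mem_toList.mpr hsB, by simp [hso]⟩
          simp [hBe, hany]
        · replace hhit : ∀ s ∈ qA, s.1 ≠ obj := fun s hs hc => hhit ⟨s, hs, hc⟩
          obtain ⟨T, hT⟩ := aScan_no_hit (obj := obj) (cnt := cnt) (tmp := ∅)
            (fun s hs => hhit s (Std.HashSet.mem_toList.mp hs))
          rw [hT]
          by_cases hBe : qB.isEmpty
          · -- B's loop has already exhausted the search space: A returns 0 as well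
            rw [Std.HashSet.isEmpty_iff_forall_not_mem] at hBe
            rw [if_pos (Std.HashSet.isEmpty_iff_forall_not_mem.mpr hBe)]
            apply aLoop_zero obj fuel T vis (cnt + 1)
            · intro s hsT
              rcases (mem_aScan_ok hT s).mp hsT with h | ⟨u, hu, hsucc⟩
              · exact absurd h (Std.HashSet.not_mem_empty)
              · exact h5 u (h3 u (Std.HashSet.mem_toList.mp hu)) (hBe u) s hsucc
            · intro s hs; exact h4 s hs (hBe s)
            · intro s hs; exact h5 s hs (hBe s)
          · have hany : qB.toList.any (fun t => t.1 == obj) = false := by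
              simp only [List.any_eq_false]
              intro s hs
              simp only [beq_iff_eq]
              exact hhit s (h2 s (Std.HashSet.mem_toList.mp hs))
            simp only [hBe, if_neg, Bool.false_eq_true, not_false_iff, hany]
            apply ih
            -- re-establish the invariant for the next level
            have hmemT : ∀ x, x ∈ T ↔ ∃ s ∈ qA, x ∈ succList s.1 s.2 := by
              intro x
              rw [mem_aScan_ok hT x]
              simp only [Std.HashSet.mem_toList]
              have : x ∉ (∅ : Std.HashSet (Int × Int)) := Std.HashSet.not_mem_empty
              tauto
            have hmemN : ∀ x, x ∈ bCollect vis qB.toList ∅ ↔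
                ∃ s ∈ qB, x ∈ succList s.1 s.2 ∧ x ∉ vis := by
              intro x
              rw [mem_bCollect]
              simp only [Std.HashSet.mem_toList]
              have : x ∉ (∅ : Std.HashSet (Int × Int)) := Std.HashSet.not_mem_empty
              tauto
            have hmemV : ∀ x, x ∈ (bCollect vis qB.toList ∅).toList.foldl
                  (fun v s => v.insert s) vis ↔
                x ∈ vis ∨ x ∈ bCollect vis qB.toList ∅ := by
              intro x
              rw [mem_foldl_insert]
              simp only [Std.HashSet.mem_toList]
            refine ⟨?_, ?_, ?_, ?_, ?_⟩
            · intro s hs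
              rw [hmemV]; exact Or.inr hs
            · intro s hs
              rw [hmemN] at hs
              obtain ⟨u, hu, hsucc, _⟩ := hs
              exact (hmemT s).mpr ⟨u, h2 u hu, hsucc⟩
            · intro s hs
              rw [hmemV]
              rw [hmemT] at hs
              obtain ⟨u, hu, hsucc⟩ := hs
              by_cases huB : u ∈ qB
              · by_cases hsv : s ∈ vis
                · exact Or.inl hsv
                · exact Or.inr ((hmemN s).mpr ⟨u, huB, hsucc, hsv⟩)
              · exact Or.inl (h5 u (h3 u hu) huB s hsucc)
            · intro s hs hnb
              rw [hmemV] at hs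
              rcases hs with hs | hs
              · by_cases hsB : s ∈ qB
                · exact hhit s (h2 s hsB)
                · exact h4 s hs hsB
              · exact absurd hs hnb
            · intro s hs hnb t ht
              rw [hmemV] at hs ⊢
              rcases hs with hs | hs
              · by_cases hsB : s ∈ qB
                · by_cases htv : t ∈ vis
                  · exact Or.inl htv
                  · exact Or.inr ((hmemN t).mpr ⟨s, hsB, ht, htv⟩)
                · exact Or.inl (h5 s hs hsB t ht)
              · exact absurd hs hnb

-- ===== VERDICT (by name: the statement is the Claim_ definition above) =====
theorem BFS_spec : Claim_equal_BFS := by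
  intro obj _
  unfold Spec_BFS BFS BFS_alt
  apply loop_eq
  refine ⟨?_, ?_, ?_, ?_, ?_⟩ <;>
    simp [Std.HashSet.mem_insert]
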